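-- pv_equiv track=rewrite | github.com/nir3y/mahjong-analyzer | backend/game/yaku_detector.py | _has_iipeiko_seed
-- ===== SOURCE A (Python) =====
-- from collections import Counter, defaultdict
--
-- def _has_iipeiko_seed(types: list[int]) -> bool:
--     counts = Counter(t for t in types if t < 27)
--     for suit in range(3):
--         base = suit * 9
--         for start in range(0, 7):
--             if min(counts.get(base + start + offset, 0) for offset in range(3)) >= 2:
--                 return True
--     return False
-- ===== SOURCE B (Python) =====
-- def _has_iipeiko_seed(types: list[int]) -> bool:
--     cnt = [0] * 27
--     for t in types:
--         if 0 <= t < 27: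
--             cnt[t] += 1
--     for base in (0, 9, 18):
--         run = 0
--         for c in cnt[base:base + 9]:
--             if c >= 2:
--                 run += 1
--                 if run == 3:
--                     return True
--             else:
--                 run = 0
--     return False
-- ===== Notes on version B (the rewrite author's own statement) =====
-- stated objective: alternative
-- what changed: Replaces the Counter dict and the 21-window 3-wide min test by a 27-slot count array built in one pass and a run-length accumulator that scans each suit's nine counts once, returning as soon as three consecutive counts are >= 2.
import Mathlib
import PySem

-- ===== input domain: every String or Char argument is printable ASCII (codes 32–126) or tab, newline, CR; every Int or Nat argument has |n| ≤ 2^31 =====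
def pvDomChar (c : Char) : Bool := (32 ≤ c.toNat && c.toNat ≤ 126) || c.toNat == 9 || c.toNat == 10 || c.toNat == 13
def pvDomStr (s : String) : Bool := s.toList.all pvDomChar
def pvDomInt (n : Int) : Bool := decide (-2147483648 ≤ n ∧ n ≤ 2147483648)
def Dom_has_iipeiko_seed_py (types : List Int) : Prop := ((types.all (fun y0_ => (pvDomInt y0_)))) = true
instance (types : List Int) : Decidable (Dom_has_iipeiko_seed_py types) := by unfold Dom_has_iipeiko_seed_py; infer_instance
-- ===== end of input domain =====

-- B replaces A's Counter dict and 21 window-min tests by a 27-slot count array and one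
-- run-length scan per suit (alternative decomposition; return value proved identical).

-- ===== PORT A =====
def has_iipeiko_seed_py (types : List Int) : Bool :=
  let counts := PySem.Dict.counter (types.filter (fun t => decide (t < 27)))
  (PySem.List.pyRange 0 3 1).any (fun suit =>
    let base := suit * 9
    (PySem.List.pyRange 0 7 1).any (fun start =>
      decide (2 ≤ min (min (counts.getD (base + start + 0) 0) (counts.getD (base + start + 1) 0))
                      (counts.getD (base + start + 2) 0))))

-- ===== PORT B =====
-- the body of Source B's first loop: 'if 0 <= t < 27: cnt[t] += 1'
def pvStep (cnt : List Int) (t : Int) : List Int :=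
  if 0 ≤ t ∧ t < 27 then PySem.List.pySetD cnt t (PySem.List.pyGetD cnt t 0 + 1) else cnt

def pvRunScan : List Int → Int → Bool
  | [], _ => false
  | c :: rest, run =>
    if 2 ≤ c then
      if run + 1 == 3 then true else pvRunScan rest (run + 1)
    else pvRunScan rest 0

def has_iipeiko_seed_py_alt (types : List Int) : Bool :=
  let cnt := types.foldl pvStep (PySem.List.pyRepeat [0] 27)
  ([0, 9, 18] : List Int).any (fun base =>
    pvRunScan (PySem.List.slice cnt (some base) (some (base + 9))) 0)

-- ===== PRECONDITION & SPEC =====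
def Spec_has_iipeiko_seed_py (types : List Int) (out : Bool) : Prop := out = has_iipeiko_seed_py_alt types
instance (types : List Int) (out : Bool) : Decidable (Spec_has_iipeiko_seed_py types out) := by unfold Spec_has_iipeiko_seed_py; infer_instance

-- ===== CLAIM (what is proved, stated in full; the proofs are below) =====
def Claim_equal_has_iipeiko_seed_py : Prop := ∀ (types : List Int), Dom_has_iipeiko_seed_py types → Spec_has_iipeiko_seed_py types (has_iipeiko_seed_py types)

-- ===== LEMMAS AND PROOFS =====
-- the seed predicate both programs decide
def pvSeed (types : List Int) : Prop :=
  ∃ s k : Nat, s < 3 ∧ k < 7 ∧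
    2 ≤ types.count ((9*s+k : Nat) : Int) ∧
    2 ≤ types.count ((9*s+k+1 : Nat) : Int) ∧
    2 ≤ types.count ((9*s+k+2 : Nat) : Int)

-- run-length scan characterization
def pvPref (n : Nat) (cs : List Int) : Prop := n ≤ cs.length ∧ ∀ j < n, 2 ≤ cs.getD j 0
def pvWin (cs : List Int) : Prop :=
  ∃ k, k + 2 < cs.length ∧ 2 ≤ cs.getD k 0 ∧ 2 ≤ cs.getD (k+1) 0 ∧ 2 ≤ cs.getD (k+2) 0

lemma pvPref_mono {m n : Nat} {cs : List Int} (h : n ≤ m) (hp : pvPref m cs) : pvPref n cs :=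
  ⟨le_trans h hp.1, fun j hj => hp.2 j (lt_of_lt_of_le hj h)⟩

lemma pvPref_three_win {cs : List Int} (h : pvPref 3 cs) : pvWin cs := by
  obtain ⟨hl, hj⟩ := h
  exact ⟨0, by omega, hj 0 (by omega), hj 1 (by omega), hj 2 (by omega)⟩

lemma pvPref_cons_succ {n : Nat} {c : Int} {cs : List Int} :
    pvPref (n+1) (c :: cs) ↔ 2 ≤ c ∧ pvPref n cs := by
  constructor
  · rintro ⟨hl, hj⟩
    refine ⟨hj 0 (by omega), by simpa using Nat.succ_le_succ_iff.mp hl, fun j hj' => ?_⟩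
    simpa using hj (j+1) (by omega)
  · rintro ⟨hc, hl, hj⟩
    refine ⟨by simpa using Nat.succ_le_succ hl, fun j hj' => ?_⟩
    cases j with
    | zero => simpa using hc
    | succ j => simpa using hj j (by omega)

lemma pvWin_cons {c : Int} {cs : List Int} :
    pvWin (c :: cs) ↔ pvPref 3 (c :: cs) ∨ pvWin cs := by
  constructor
  · rintro ⟨k, hk, h0, h1, h2⟩
    cases k with
    | zero =>
      left
      refine ⟨by simp at hk ⊢; omega, fun j hj => ?_⟩
      interval_cases j <;> simp_all
    | succ k =>
      right
      exact ⟨k, by simpa using hk, by simpa using h0, by simpa using h1, by simpa using h2⟩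
  · rintro (h | ⟨k, hk, h0, h1, h2⟩)
    · exact pvPref_three_win h
    · exact ⟨k+1, by simpa using hk, by simpa using h0, by simpa using h1, by simpa using h2⟩

lemma pvRunScan_char : ∀ (cs : List Int) (r : Int), 0 ≤ r → r < 3 →
    (pvRunScan cs r = true ↔ pvPref (3 - r).toNat cs ∨ pvWin cs) := by
  intro cs
  induction cs with
  | nil =>
    intro r h0 h3
    simp only [pvRunScan]
    constructor
    · intro h; exact absurd h (by simp)
    · rintro (⟨hl, _⟩ | ⟨k, hk, _⟩)
      · simp at hl; omega
      · simp at hk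
  | cons c rest ih =>
    intro r h0 h3
    simp only [pvRunScan]
    by_cases hc : 2 ≤ c
    · simp only [if_pos hc]
      by_cases hr : r + 1 = 3
      · have : (r + 1 == 3) = true := by simp [hr]
        rw [this]
        simp only [if_true]
        constructor
        · intro _
          left
          have : (3 - r).toNat = 1 := by omega
          rw [this]
          refine ⟨by simp, fun j hj => ?_⟩
          interval_cases j; simpa using hc
        · intro _; trivial
      · have : (r + 1 == 3) = false := by simp [hr]
        rw [this]
        simp only [Bool.false_eq_true, if_false]
        rw [ih (r+1) (by omega) (by omega)]
        rw [pvWin_cons]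
        have h31 : (3 - r).toNat = (3 - (r+1)).toNat + 1 := by omega
        rw [h31, pvPref_cons_succ]
        constructor
        · rintro (hp | hw)
          · left; exact ⟨hc, hp⟩
          · right; right; exact hw
        · rintro (⟨_, hp⟩ | h3' | hw)
          · left; exact hp
          · left
            have h32 : (3:Nat) = (3 - (r+1)).toNat + ((3:Nat) - (3 - (r+1)).toNat) := by omega
            cases c with
            | _ => exact pvPref_mono (by omega) (pvPref_cons_succ.mp h3').2
          · right; exact hw
    · simp only [if_neg hc]
      rw [ih 0 (by omega) (by omega)]
      rw [pvWin_cons]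
      constructor
      · rintro (hp | hw)
        · right; right; exact pvPref_three_win hp
        · right; right; exact hw
      · rintro (hp | hp3 | hw)
        · have := (pvPref_cons_succ.mp (by
            have : (3 - r).toNat = ((3 - r).toNat - 1) + 1 := by omega
            rw [this] at hp; exact hp)).1
          exact absurd this hc
        · exact absurd (pvPref_cons_succ.mp hp3).1 hc
        · right; exact hw

lemma pvStep_length (cnt : List Int) (t : Int) : (pvStep cnt t).length = cnt.length := by
  unfold pvStep
  split
  · next h => rw [PySem.List.pySetD_of_nonneg (h := h.1)]; simp
  · rfl

lemma pvBuild_length : ∀ (ts acc : List Int), (ts.foldl pvStep acc).length = acc.length := by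
  intro ts
  induction ts with
  | nil => intro acc; rfl
  | cons t ts ih => intro acc; simp only [List.foldl_cons]; rw [ih, pvStep_length]

lemma pvBuild_getD : ∀ (ts acc : List Int), acc.length = 27 → ∀ (i : Nat), i < 27 →
    (ts.foldl pvStep acc).getD i 0 = acc.getD i 0 + (ts.count ((i : Nat) : Int) : Int) := by
  intro ts
  induction ts with
  | nil => intro acc _ i _; simp
  | cons t ts ih =>
    intro acc hl i hi
    simp only [List.foldl_cons]
    rw [ih (pvStep acc t) (by rw [pvStep_length]; exact hl) i hi]
    have hcount : (t :: ts).count ((i : Nat) : Int) = (if ((i:Nat):Int) = t then 1 else 0) + ts.count ((i:Nat):Int) := by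
      rw [List.count_cons]; by_cases h : ((i:Nat):Int) = t <;> simp [h] <;> omega
    rw [hcount]
    have hstep : (pvStep acc t).getD i 0 = acc.getD i 0 + (if ((i:Nat):Int) = t then 1 else 0) := by
      unfold pvStep
      split
      · next h =>
        rw [PySem.List.pySetD_of_nonneg (h := h.1)]
        have htn : t.toNat < acc.length := by omega
        by_cases he : ((i:Nat):Int) = t
        · have hit : i = t.toNat := by omega
          subst hit
          rw [List.getD_eq_getElem _ _ (by simpa using htn), List.getElem_set_self,
              PySem.List.pyGetD_eq_getElem _ _ h.1 (by omega),
              List.getD_eq_getElem _ _ htn]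
          simp [he]
        · have hne : i ≠ t.toNat := by omega
          rw [List.getD_eq_getElem _ _ (by simpa using hi.trans_eq hl.symm),
              List.getElem_set_ne (by omega),
              List.getD_eq_getElem _ _ (by omega)]
          simp [he]
      · next h =>
        have : ¬ ((i:Nat):Int) = t := by omega
        simp [this]
    rw [hstep]
    push_cast
    ring

lemma pvRunScan_zero (cs : List Int) : pvRunScan cs 0 = true ↔ pvWin cs := by
  rw [pvRunScan_char cs 0 (by omega) (by omega)]
  constructor
  · rintro (hp | hw)
    · exact pvPref_three_win (by simpa using hp)
    · exact hw
  · intro hw; exact Or.inr hw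

lemma pvGetD_take_drop (l : List Int) (b n j : Nat) (hj : j < n) :
    ((l.drop b).take n).getD j 0 = l.getD (b+j) 0 := by
  simp [List.getD_eq_getElem?_getD, List.getElem?_take_of_lt hj, List.getElem?_drop]

lemma pvWin_slice (types C : List Int) (hlen : C.length = 27)
    (hC : ∀ i, i < 27 → C.getD i 0 = (types.count ((i : Nat) : Int) : Int))
    (b : Nat) (hb : b + 9 ≤ 27) :
    pvWin ((C.drop b).take 9) ↔
      ∃ k, k < 7 ∧ 2 ≤ types.count ((b+k : Nat) : Int) ∧
        2 ≤ types.count ((b+k+1 : Nat) : Int) ∧ 2 ≤ types.count ((b+k+2 : Nat) : Int) := by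
  have hlen9 : ((C.drop b).take 9).length = 9 := by simp [hlen]; omega
  unfold pvWin
  rw [hlen9]
  constructor
  · rintro ⟨k, hk, h0, h1, h2⟩
    rw [pvGetD_take_drop _ _ _ _ (by omega)] at h0 h1 h2
    rw [show b+(k+1) = b+k+1 from by omega] at h1
    rw [show b+(k+2) = b+k+2 from by omega] at h2
    rw [hC (b+k) (by omega)] at h0
    rw [hC (b+k+1) (by omega)] at h1
    rw [hC (b+k+2) (by omega)] at h2
    exact ⟨k, by omega, by exact_mod_cast h0, by exact_mod_cast h1, by exact_mod_cast h2⟩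
  · rintro ⟨k, hk, h0, h1, h2⟩
    refine ⟨k, by omega, ?_, ?_, ?_⟩
    · rw [pvGetD_take_drop _ _ _ _ (by omega), hC (b+k) (by omega)]; exact_mod_cast h0
    · rw [pvGetD_take_drop _ _ _ _ (by omega), show b+(k+1) = b+k+1 from by omega,
          hC (b+k+1) (by omega)]; exact_mod_cast h1
    · rw [pvGetD_take_drop _ _ _ _ (by omega), show b+(k+2) = b+k+2 from by omega,
          hC (b+k+2) (by omega)]; exact_mod_cast h2

lemma pvB_char (types : List Int) : has_iipeiko_seed_py_alt types = true ↔ pvSeed types := by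
  unfold has_iipeiko_seed_py_alt
  set C := types.foldl pvStep (PySem.List.pyRepeat [0] 27) with hCdef
  have hlen : C.length = 27 := by
    rw [hCdef, pvBuild_length]
    rw [PySem.List.pyRepeat_singleton]
    simp
  have hC : ∀ i, i < 27 → C.getD i 0 = (types.count ((i : Nat) : Int) : Int) := by
    intro i hi
    rw [hCdef, pvBuild_getD types _ (by rw [PySem.List.pyRepeat_singleton]; simp) i hi]
    rw [PySem.List.pyRepeat_singleton]
    simp only [List.getD_eq_getElem?_getD, List.getElem?_replicate]
    split <;> simp
  have hslice : ∀ bz : Int, 0 ≤ bz → bz + 9 ≤ 27 →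
      PySem.List.slice C (some bz) (some (bz + 9)) = (C.drop bz.toNat).take 9 := by
    intro bz h0 h9
    rw [PySem.List.slice_toNat _ h0 (by omega)]
    congr 1
    omega
  simp only [List.any_eq_true, List.mem_cons, List.not_mem_nil, or_false]
  constructor
  · rintro ⟨bz, hbz, hrun⟩
    have hb3 : bz = 0 ∨ bz = 9 ∨ bz = 18 := by simpa using hbz
    rcases hb3 with h | h | h <;> subst h <;>
      rw [hslice _ (by omega) (by omega)] at hrun <;>
      rw [pvRunScan_zero, pvWin_slice types C hlen hC _ (by omega)] at hrun
    · obtain ⟨k, hk, h0, h1, h2⟩ := hrun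
      exact ⟨0, k, by omega, hk, by simpa using h0, by simpa using h1, by simpa using h2⟩
    · obtain ⟨k, hk, h0, h1, h2⟩ := hrun
      exact ⟨1, k, by omega, hk, by simpa using h0, by simpa using h1, by simpa using h2⟩
    · obtain ⟨k, hk, h0, h1, h2⟩ := hrun
      exact ⟨2, k, by omega, hk, by simpa using h0, by simpa using h1, by simpa using h2⟩
  · rintro ⟨s, k, hs, hk, h0, h1, h2⟩
    refine ⟨9 * (s : Int), by interval_cases s <;> simp, ?_⟩
    have hsz : (9 * (s:Int)).toNat = 9 * s := by omega
    rw [hslice _ (by positivity) (by omega), pvRunScan_zero, hsz,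
        pvWin_slice types C hlen hC _ (by omega)]
    exact ⟨k, hk, by simpa using h0, by simpa using h1, by simpa using h2⟩

lemma pvA_char (types : List Int) : has_iipeiko_seed_py types = true ↔ pvSeed types := by
  unfold has_iipeiko_seed_py
  have hcnt : ∀ key : Int, 0 ≤ key → key < 27 →
      (PySem.Dict.counter (types.filter (fun t => decide (t < 27)))).getD key 0
        = (types.count key : Int) := by
    intro key h0 h27
    rw [PySem.Dict.getD_counter]
    rw [List.count_filter (by simpa using h27)]
  simp only [List.any_eq_true, PySem.List.mem_pyRange_one, decide_eq_true_eq, le_min_iff]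
  constructor
  · rintro ⟨suit, ⟨hs0, hs3⟩, start, ⟨ht0, ht7⟩, ⟨⟨h0, h1⟩, h2⟩⟩
    rw [hcnt _ (by omega) (by omega)] at h0 h1 h2
    refine ⟨suit.toNat, start.toNat, by omega, by omega, ?_, ?_, ?_⟩
    · have he : suit * 9 + start + 0 = ((9 * suit.toNat + start.toNat : Nat) : Int) := by push_cast; omega
      rw [he] at h0; exact_mod_cast h0
    · have he : suit * 9 + start + 1 = ((9 * suit.toNat + start.toNat + 1 : Nat) : Int) := by push_cast; omega
      rw [he] at h1; exact_mod_cast h1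
    · have he : suit * 9 + start + 2 = ((9 * suit.toNat + start.toNat + 2 : Nat) : Int) := by push_cast; omega
      rw [he] at h2; exact_mod_cast h2
  · rintro ⟨s, k, hs, hk, h0, h1, h2⟩
    refine ⟨(s : Int), ⟨by positivity, by exact_mod_cast hs⟩, (k : Int), ⟨by positivity, by exact_mod_cast hk⟩, ?_⟩
    rw [hcnt _ (by positivity) (by omega), hcnt _ (by positivity) (by omega), hcnt _ (by positivity) (by omega)]
    refine ⟨⟨?_, ?_⟩, ?_⟩
    · have he : (s:Int) * 9 + (k:Int) + 0 = ((9 * s + k : Nat) : Int) := by push_cast; omega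
      rw [he]; exact_mod_cast h0
    · have he : (s:Int) * 9 + (k:Int) + 1 = ((9 * s + k + 1 : Nat) : Int) := by push_cast; omega
      rw [he]; exact_mod_cast h1
    · have he : (s:Int) * 9 + (k:Int) + 2 = ((9 * s + k + 2 : Nat) : Int) := by push_cast; omega
      rw [he]; exact_mod_cast h2


-- ===== VERDICT (by name: the statement is the Claim_ definition above) =====
theorem has_iipeiko_seed_py_spec : Claim_equal_has_iipeiko_seed_py := by
  intro types _
  unfold Spec_has_iipeiko_seed_py
  rw [Bool.eq_iff_iff, pvA_char, pvB_char]
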